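-- pv_equiv track=rewrite | github.com/PranshuSaraswat/Empirical-Evaluation-of-Multicore-Scaling-in-Ray-Tracing | raytracer.py | make_tiles
-- ===== SOURCE A (Python) =====
-- def make_tiles(width, height, tile):
--     tiles = []
--     for y in range(0, height, tile):
--         for x in range(0, width, tile):
--             x1 = min(x+tile, width)
--             y1 = min(y+tile, height)
--             tiles.append((x, x1, y, y1))
--     return tiles
-- ===== SOURCE B (Python) =====
-- def make_tiles(width, height, tile):
--     nx = max(0, -(-width // tile))
--     ny = max(0, -(-height // tile))
--     return [(j * tile, min(j * tile + tile, width), i * tile, min(i * tile + tile, height))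
--             for i, j in (divmod(k, nx) for k in range(nx * ny))]
-- ===== Notes on version B (the rewrite author's own statement) =====
-- stated objective: alternative
-- what changed: B replaces the nested row/column scans by a closed-form tile count per axis (ceiling division) and one flat comprehension over tile indices, recovering each tile's row and column with divmod.
import Mathlib
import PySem

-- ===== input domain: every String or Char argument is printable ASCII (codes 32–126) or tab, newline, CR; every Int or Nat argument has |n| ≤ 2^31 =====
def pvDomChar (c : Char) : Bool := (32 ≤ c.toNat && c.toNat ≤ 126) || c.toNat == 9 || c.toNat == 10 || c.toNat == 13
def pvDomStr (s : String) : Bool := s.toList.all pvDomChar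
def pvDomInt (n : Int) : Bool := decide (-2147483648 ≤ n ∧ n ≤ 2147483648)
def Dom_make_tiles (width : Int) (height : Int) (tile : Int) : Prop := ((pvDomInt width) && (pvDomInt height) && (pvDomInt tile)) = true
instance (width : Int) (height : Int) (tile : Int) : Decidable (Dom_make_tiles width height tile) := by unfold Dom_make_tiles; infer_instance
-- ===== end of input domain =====

-- B computes the per-axis tile counts in closed form (ceiling division) and emits all tiles
-- in one flat loop over tile indices, recovering row/column with divmod; alternative structure, same cost.
-- ===== PORT A =====
def make_tiles (width : Int) (height : Int) (tile : Int) : List (Int × Int × Int × Int) :=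
  (PySem.List.pyRange 0 height tile).foldl (fun tiles y =>
    (PySem.List.pyRange 0 width tile).foldl (fun tiles x =>
      tiles ++ [(x, min (x + tile) width, y, min (y + tile) height)]) tiles) []

-- ===== PORT B =====
def make_tiles_alt (width : Int) (height : Int) (tile : Int) : List (Int × Int × Int × Int) :=
  let nx := max 0 (-(PySem.Int.floordiv (-width) tile))
  let ny := max 0 (-(PySem.Int.floordiv (-height) tile))
  (((PySem.List.pyRange 0 (nx * ny) 1).map
      (fun k => (PySem.Int.floordiv k nx, PySem.Int.mod k nx))).map
    (fun p => (p.2 * tile, min (p.2 * tile + tile) width,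
               p.1 * tile, min (p.1 * tile + tile) height)))

-- ===== PRECONDITION & SPEC =====
-- Pre_ excludes exactly tile = 0, where A raises ValueError (range step 0) and B raises ZeroDivisionError.
def Pre_make_tiles (width : Int) (height : Int) (tile : Int) : Prop := tile ≠ 0
instance (width : Int) (height : Int) (tile : Int) : Decidable (Pre_make_tiles width height tile) := by unfold Pre_make_tiles; infer_instance
def pvWitness_make_tiles : Int × Int × Int := (5, 4, 2)
def Spec_make_tiles (width : Int) (height : Int) (tile : Int) (out : List (Int × Int × Int × Int)) : Prop := out = make_tiles_alt width height tile
instance (width : Int) (height : Int) (tile : Int) (out : List (Int × Int × Int × Int)) : Decidable (Spec_make_tiles width height tile out) := by unfold Spec_make_tiles; infer_instance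

-- ===== CLAIM (what is proved, stated in full; the proofs are below) =====
def Claim_equal_make_tiles : Prop := ∀ (width : Int) (height : Int) (tile : Int), Dom_make_tiles width height tile → Pre_make_tiles width height tile → Spec_make_tiles width height tile (make_tiles width height tile)

-- ===== LEMMAS AND PROOFS =====

-- ceiling-vs-floor identity: -((-b) / t) = (b + t - 1) / t for 0 < t (Euclidean division)
theorem neg_ediv_neg_eq (b t : Int) (ht : 0 < t) : -((-b) / t) = (b + t - 1) / t := by
  have h := Int.ediv_add_emod (-b) t
  set q := (-b) / t with hq
  set r := (-b) % t with hr
  have hr0 : 0 ≤ r := Int.emod_nonneg _ (by omega)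
  have hrt : r < t := Int.emod_lt_of_pos _ ht
  have hb : b + t - 1 = (t - 1 - r) + t * (-q) := by rw [mul_neg]; omega
  rw [hb, Int.add_mul_ediv_left _ _ (by omega : t ≠ 0),
    Int.ediv_eq_zero_of_lt (by omega) (by omega)]
  omega

theorem toNat_max_zero (x : Int) : (max 0 x).toNat = x.toNat := by omega

-- pyRange from 0 with nonzero step, its count written as B computes it (Python ceil division)
theorem pyRange_zero_eq (b t : Int) (ht : t ≠ 0) :
    PySem.List.pyRange 0 b t
      = (List.range (max 0 (-(PySem.Int.floordiv (-b) t))).toNat).map (fun k : Nat => t * (k : Int)) := by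
  unfold PySem.List.pyRange PySem.Int.floordiv
  rw [if_neg ht]
  have hfun : (fun k : Nat => 0 + t * (k : Int)) = (fun k : Nat => t * (k : Int)) := by
    funext k; ring
  rcases lt_or_gt_of_ne ht with hneg | hpos
  · -- t < 0 : (-b).fdiv t = b.fdiv (-t) = b / (-t)
    have h1 : (-b).fdiv t = b / (-t) := by
      rw [show (-b).fdiv t = (-(-b)).fdiv (-t) from (Int.neg_fdiv_neg (-b) t).symm]
      simp [Int.fdiv_eq_ediv_of_nonneg _ (by omega : (0:Int) ≤ -t)]
    have h2 : -(b / (-t)) = (-b + (-t) - 1) / (-t) := by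
      have h := neg_ediv_neg_eq (-b) (-t) (by omega)
      rwa [neg_neg] at h
    rw [if_neg (by omega : ¬ (0:Int) < t), h1, h2, hfun]
    have hcount : (if b < 0 then ((0 - b + -t - 1) / (-t)).toNat else 0)
        = (max 0 ((-b + (-t) - 1) / (-t))).toNat := by
      rw [toNat_max_zero]
      by_cases hb : b < 0
      · rw [if_pos hb, show (0:Int) - b + -t - 1 = -b + (-t) - 1 by ring]
      · rw [if_neg hb]
        have hle : (-b + (-t) - 1) / (-t) < 1 := by
          rw [Int.ediv_lt_iff_lt_mul (by omega : (0:Int) < -t)]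
          omega
        omega
    rw [hcount]
  · -- 0 < t : (-b).fdiv t = (-b) / t
    have h1 : (-b).fdiv t = (-b) / t := Int.fdiv_eq_ediv_of_nonneg _ (by omega)
    rw [if_pos hpos, h1, neg_ediv_neg_eq b t hpos, hfun]
    have hcount : (if 0 < b then ((b - 0 + t - 1) / t).toNat else 0)
        = (max 0 ((b + t - 1) / t)).toNat := by
      rw [toNat_max_zero]
      by_cases hb : 0 < b
      · rw [if_pos hb, show b - 0 + t - 1 = b + t - 1 by ring]
      · rw [if_neg hb]
        have hle : (b + t - 1) / t < 1 := by
          rw [Int.ediv_lt_iff_lt_mul hpos]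
          omega
        omega
    rw [hcount]

-- one flat index loop over range (m*n) with divmod = the nested loops
theorem range_mul_flatMap {α : Type} (g : Nat → Nat → α) (m n : Nat) :
    (List.range (m * n)).map (fun k => g (k / n) (k % n))
      = (List.range m).flatMap (fun i => (List.range n).map (fun j => g i j)) := by
  induction m with
  | zero => simp
  | succ m ih =>
    rcases Nat.eq_zero_or_pos n with hn | hn
    · simp [hn]
    · rw [Nat.succ_mul, List.range_add, List.map_append, ih, List.range_succ,
        List.flatMap_append]
      congr 1
      simp only [List.map_map, List.flatMap_cons, List.flatMap_nil, List.append_nil]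
      apply List.map_congr_left
      intro j hj
      simp only [List.mem_range] at hj
      have h1 : (m * n + j) / n = m := by
        rw [Nat.mul_comm, Nat.mul_add_div hn, Nat.div_eq_of_lt hj, Nat.add_zero]
      have h2 : (m * n + j) % n = j := by
        rw [Nat.mul_comm m n, Nat.mul_add_mod, Nat.mod_eq_of_lt hj]
      simp [Function.comp, h1, h2]

-- A as a flatMap over its two ranges
theorem make_tiles_eq_flatMap (width height tile : Int) :
    make_tiles width height tile
      = (PySem.List.pyRange 0 height tile).flatMap (fun y =>
          (PySem.List.pyRange 0 width tile).map (fun x =>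
            (x, min (x + tile) width, y, min (y + tile) height))) := by
  unfold make_tiles
  have hinner : ∀ (y : Int) (acc : List (Int × Int × Int × Int)),
      (PySem.List.pyRange 0 width tile).foldl (fun tiles x =>
        tiles ++ [(x, min (x + tile) width, y, min (y + tile) height)]) acc
      = acc ++ (PySem.List.pyRange 0 width tile).map (fun x =>
          (x, min (x + tile) width, y, min (y + tile) height)) := fun y acc =>
    PySem.List.foldl_append_singleton_eq_map _ _ acc
  calc (PySem.List.pyRange 0 height tile).foldl (fun tiles y =>
        (PySem.List.pyRange 0 width tile).foldl (fun tiles x =>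
          tiles ++ [(x, min (x + tile) width, y, min (y + tile) height)]) tiles) []
      = (PySem.List.pyRange 0 height tile).foldl (fun tiles y =>
          tiles ++ (PySem.List.pyRange 0 width tile).map (fun x =>
            (x, min (x + tile) width, y, min (y + tile) height))) [] := by
        exact PySem.List.foldl_congr_mem _ _ _ _ (fun tiles y _ => hinner y tiles)
    _ = _ := by
        rw [PySem.List.foldl_append_eq_flatMap]
        simp

-- ===== VERDICT (by name: the statement is the Claim_ definition above) =====
theorem make_tiles_spec : Claim_equal_make_tiles := by
  intro width height tile _ ht
  unfold Pre_make_tiles at ht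
  unfold Spec_make_tiles
  -- abbreviations
  set nx := max 0 (-(PySem.Int.floordiv (-width) tile)) with hnx
  set ny := max 0 (-(PySem.Int.floordiv (-height) tile)) with hny
  have hnx0 : 0 ≤ nx := le_max_left _ _
  have hny0 : 0 ≤ ny := le_max_left _ _
  -- B as a flat map over List.range (ny.toNat * nx.toNat)
  have hBrange : PySem.List.pyRange 0 (nx * ny) 1
      = (List.range (ny.toNat * nx.toNat)).map (fun k : Nat => (k : Int)) := by
    rw [PySem.List.pyRange_one]
    have : (nx * ny - 0).toNat = ny.toNat * nx.toNat := by
      rw [Int.sub_zero, Int.toNat_mul hnx0 hny0, Nat.mul_comm]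
    rw [this]
    simp
  have hB : make_tiles_alt width height tile
      = (List.range (ny.toNat * nx.toNat)).map (fun k : Nat =>
          (PySem.Int.mod (k : Int) nx * tile,
           min (PySem.Int.mod (k : Int) nx * tile + tile) width,
           PySem.Int.floordiv (k : Int) nx * tile,
           min (PySem.Int.floordiv (k : Int) nx * tile + tile) height)) := by
    unfold make_tiles_alt
    simp only [← hnx, ← hny, hBrange, List.map_map]
    rfl
  rw [hB, make_tiles_eq_flatMap,
    pyRange_zero_eq width tile ht, pyRange_zero_eq height tile ht, ← hnx, ← hny,
    List.flatMap_map]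
  simp only [List.map_map]
  have hdm : ∀ k : Nat, k < ny.toNat * nx.toNat →
      PySem.Int.floordiv (k : Int) nx = ((k / nx.toNat : Nat) : Int) ∧
      PySem.Int.mod (k : Int) nx = ((k % nx.toNat : Nat) : Int) := by
    intro k hk
    have hpos : 0 < nx.toNat := by
      rcases Nat.eq_zero_or_pos nx.toNat with h0 | h
      · rw [h0, Nat.mul_zero] at hk; exact absurd hk (by omega)
      · exact h
    have hxc : nx = (nx.toNat : Int) := (Int.toNat_of_nonneg hnx0).symm
    constructor
    · unfold PySem.Int.floordiv
      rw [hxc, Int.fdiv_eq_ediv_of_nonneg _ (by positivity)]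
      push_cast
      rfl
    · unfold PySem.Int.mod
      rw [hxc]
      rw [Int.fmod_eq_emod, if_pos (Or.inl (by positivity)), add_zero]
      push_cast
      rfl
  rw [List.map_congr_left (fun k hk => by
    rcases hdm k (List.mem_range.mp hk) with ⟨h1, h2⟩
    rw [h1, h2])]
  rw [range_mul_flatMap (fun i j =>
      (((j : Int)) * tile,
       min (((j : Int)) * tile + tile) width,
       ((i : Int)) * tile,
       min (((i : Int)) * tile + tile) height)) ny.toNat nx.toNat]
  apply congrArg (fun f => List.flatMap f (List.range ny.toNat))
  funext i
  apply List.map_congr_left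
  intro j hj
  simp [Function.comp, Int.mul_comm]
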